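-- pv_equiv track=rewrite | github.com/ianowuor/DSA | friends.py | solution
-- ===== SOURCE A (Python) =====
-- def solution(P, S):
--     S = sorted(S)
--     total_people = sum(P)
--     total_seats = sum(S)
--
--     if total_seats < total_people:  # Handle the case where there aren't enough seats
--         return -1  # Or raise an exception, depending on requirements
--
--     empty_seats = total_seats - total_people
--
--     if empty_seats == 0:  # If no empty seats are possible, all cars are needed.
--         return 0
--
--     count = 0
--     for i, s in enumerate(S):
--         count += s
--         if count >= empty_seats:
--             return len(S) - (i + 1) if count == empty_seats else len(S) - i
-- ===== SOURCE B (Python) =====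
-- def solution(P, S):
--     total_people = sum(P)
--     total_seats = sum(S)
--     if total_seats < total_people:
--         return -1
--     if total_seats == total_people:
--         return 0
--     cap = 0
--     cars = 0
--     for s in reversed(sorted(S)):
--         if cap >= total_people:
--             break
--         cap += s
--         cars += 1
--     return cars
-- ===== Notes on version B (the rewrite author's own statement) =====
-- stated objective: alternative
-- what changed: A scans the sorted capacities ascending, accumulating seat counts until they cover the empty seats and computing the answer from the index; B instead scans the capacities descending and greedily counts how many cars are needed until their combined capacity covers the total number of people.
-- outside the precondition, e.g. on solution([-3], [1]): A returns None, B returns 0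
import Mathlib
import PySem

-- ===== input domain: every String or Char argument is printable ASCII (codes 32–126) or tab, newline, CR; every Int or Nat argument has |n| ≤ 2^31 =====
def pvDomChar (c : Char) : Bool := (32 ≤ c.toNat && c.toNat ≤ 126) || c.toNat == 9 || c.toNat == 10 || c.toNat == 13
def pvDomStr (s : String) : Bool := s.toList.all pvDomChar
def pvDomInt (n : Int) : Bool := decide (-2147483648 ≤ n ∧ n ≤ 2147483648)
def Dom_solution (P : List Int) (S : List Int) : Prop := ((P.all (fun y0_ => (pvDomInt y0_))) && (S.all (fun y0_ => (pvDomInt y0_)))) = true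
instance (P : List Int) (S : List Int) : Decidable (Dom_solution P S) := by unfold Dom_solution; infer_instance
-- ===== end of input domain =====

-- B replaces A's ascending scan that fills empty seats with a descending greedy scan that
-- counts the cars needed to seat everybody (objective: alternative; return value only).

-- ===== PORT A =====
-- A's for-loop over enumerate(S): i is the index, count the running seat sum; the bare
-- fall-through `return None` (unreachable inside Pre_solution) is rendered as 0.
def solLoopA (n : Int) (e : Int) (l : List Int) (i : Int) (count : Int) : Int :=
  match l with
  | [] => 0
  | s :: rest =>
    let count' := count + s
    if count' ≥ e then (if count' = e then n - (i + 1) else n - i)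
    else solLoopA n e rest (i + 1) count'

def solution (P : List Int) (S : List Int) : Int :=
  let S' := PySem.List.sorted S (fun x => x) false
  let total_people := P.sum
  let total_seats := S'.sum
  if total_seats < total_people then -1
  else
    let empty_seats := total_seats - total_people
    if empty_seats = 0 then 0
    else solLoopA (S'.length : Int) empty_seats S' 0 0

-- ===== PORT B =====
-- B's for-loop over reversed(sorted(S)): break once cap ≥ total_people, else take the car.
def solLoopB (people : Int) (l : List Int) (cap : Int) (cars : Int) : Int :=
  match l with
  | [] => cars
  | s :: rest => if cap ≥ people then cars else solLoopB people rest (cap + s) (cars + 1)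

def solution_alt (P : List Int) (S : List Int) : Int :=
  let total_people := P.sum
  let total_seats := S.sum
  if total_seats < total_people then -1
  else if total_seats = total_people then 0
  else solLoopB total_people ((PySem.List.sorted S (fun x => x) false).reverse) 0 0

-- ===== PRECONDITION & SPEC =====
-- Pre_ excludes exactly the inputs (sum(P) < 0 with sum(S) > sum(P)) on which A's scan
-- falls through and returns None, which is not an int.
def Pre_solution (P : List Int) (S : List Int) : Prop := S.sum ≤ P.sum ∨ 0 ≤ P.sum
instance (P : List Int) (S : List Int) : Decidable (Pre_solution P S) := by unfold Pre_solution; infer_instance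
def pvWitness_solution : List Int × List Int := ([2], [3, 1])
def Spec_solution (P : List Int) (S : List Int) (out : Int) : Prop := out = solution_alt P S
instance (P : List Int) (S : List Int) (out : Int) : Decidable (Spec_solution P S out) := by unfold Spec_solution; infer_instance

-- ===== CLAIM (what is proved, stated in full; the proofs are below) =====
def Claim_equal_solution : Prop := ∀ (P : List Int) (S : List Int), Dom_solution P S → Pre_solution P S → Spec_solution P S (solution P S)

-- ===== LEMMAS AND PROOFS =====

-- number of nonempty prefixes of l whose sum strictly exceeds r
def cntA : List Int → Int → Int
  | [], _ => 0
  | s :: t, r => (if s > r then 1 else 0) + cntA t (r - s)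

-- number of proper prefixes of l (the empty one included) whose sum is strictly below p
def cntB : List Int → Int → Int
  | [], _ => 0
  | s :: t, p => (if 0 < p then 1 else 0) + cntB t (p - s)

theorem list_sum_nonpos {t : List Int} (h : ∀ x ∈ t, x ≤ 0) : t.sum ≤ 0 := by
  induction t with
  | nil => simp
  | cons s u ih =>
    have := h s (by simp)
    have := ih (fun x hx => h x (by simp [hx]))
    simp only [List.sum_cons]; omega

theorem cntA_all_pos {t : List Int} (h : ∀ x ∈ t, 0 < x) {r : Int} (hr : r ≤ 0) :
    cntA t r = (t.length : Int) := by
  induction t generalizing r with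
  | nil => simp [cntA]
  | cons s u ih =>
    have hs : 0 < s := h s (by simp)
    have := ih (fun x hx => h x (by simp [hx])) (r := r - s) (by omega)
    simp only [cntA, List.length_cons, if_pos (show s > r by omega), this]
    push_cast; ring

theorem cntB_zero {t : List Int} (hp : t.Pairwise (fun a b => b ≤ a)) {p : Int}
    (h0 : p ≤ 0) (hs : p < t.sum) : cntB t p = 0 := by
  induction t generalizing p with
  | nil => simp [cntB]
  | cons s u ih =>
    rcases List.pairwise_cons.mp hp with ⟨hle, hu⟩
    by_cases hcase : s < p
    · exfalso
      have hus : u.sum ≤ 0 := list_sum_nonpos (fun x hx => by have := hle x hx; omega)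
      simp only [List.sum_cons] at hs; omega
    · have : cntB u (p - s) = 0 := by
        apply ih hu (by omega)
        simp only [List.sum_cons] at hs; omega
      simp [cntB, if_neg (show ¬ 0 < p by omega), this]

theorem bridgeA {l : List Int} (hp : l.Pairwise (· ≤ ·)) {n e i count : Int}
    (h0 : 0 < e - count) (hs : e - count ≤ l.sum) :
    solLoopA n e l i count = (n - i) - (l.length : Int) + cntA l (e - count) := by
  induction l generalizing i count with
  | nil => simp at hs; omega
  | cons s t ih =>
    rcases List.pairwise_cons.mp hp with ⟨hle, ht⟩
    simp only [solLoopA, List.sum_cons, List.length_cons] at *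
    by_cases hge : count + s ≥ e
    · have htpos : ∀ x ∈ t, 0 < x := fun x hx => by have := hle x hx; omega
      have hcnt : cntA t (e - count - s) = (t.length : Int) :=
        cntA_all_pos htpos (by omega)
      by_cases heq : count + s = e
      · have hno : ¬ (s > e - count) := by omega
        simp only [if_pos hge, if_pos heq, cntA, if_neg hno, hcnt]
        push_cast; omega
      · have hyes : s > e - count := by omega
        simp only [if_pos hge, if_neg heq, cntA, if_pos hyes, hcnt]
        push_cast; omega
    · have := ih ht (i := i + 1) (count := count + s) (by omega) (by omega)
      have harg : e - (count + s) = e - count - s := by ring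
      rw [if_neg hge, this, harg]
      simp only [cntA, if_neg (show ¬ (s > e - count) by omega)]
      push_cast; omega

theorem bridgeB {l : List Int} (hp : l.Pairwise (fun a b => b ≤ a)) {people cap cars : Int}
    (hs : people - cap < l.sum) :
    solLoopB people l cap cars = cars + cntB l (people - cap) := by
  induction l generalizing cap cars with
  | nil => simp [solLoopB, cntB]
  | cons s t ih =>
    rcases List.pairwise_cons.mp hp with ⟨hle, ht⟩
    simp only [List.sum_cons] at hs
    by_cases hge : cap ≥ people
    · have hzero : cntB t (people - cap - s) = 0 := by
        by_cases hcase : s < people - cap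
        · exfalso
          have : t.sum ≤ 0 := list_sum_nonpos (fun x hx => by have := hle x hx; omega)
          omega
        · exact cntB_zero ht (by omega) (by omega)
      simp only [solLoopB, if_pos hge, cntB, if_neg (show ¬ 0 < people - cap by omega), hzero]
      ring
    · have := ih ht (cap := cap + s) (cars := cars + 1) (by omega)
      have harg : people - (cap + s) = people - cap - s := by ring
      rw [solLoopB, if_neg hge, this, harg]
      simp only [cntB, if_pos (show 0 < people - cap by omega)]
      ring

theorem cntB_append (M : List Int) (x : Int) (p : Int) :
    cntB (M ++ [x]) p = cntB M p + (if M.sum < p then 1 else 0) := by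
  induction M generalizing p with
  | nil => simp [cntB]
  | cons s t ih =>
    simp only [List.cons_append, cntB, ih (p - s), List.sum_cons]
    split_ifs <;> omega

theorem cntA_eq_cntB_reverse (L : List Int) (r : Int) :
    cntA L r = cntB L.reverse (L.sum - r) := by
  induction L generalizing r with
  | nil => simp [cntA, cntB]
  | cons s t ih =>
    simp only [cntA, List.reverse_cons, List.sum_cons, cntB_append, List.sum_reverse, ih (r - s)]
    have h1 : t.sum - (r - s) = s + t.sum - r := by ring
    rw [h1]
    split_ifs <;> omega

-- ===== VERDICT (by name: the statement is the Claim_ definition above) =====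
theorem solution_spec : Claim_equal_solution := by
  intro P S _ hpre
  unfold Spec_solution solution solution_alt
  set L := PySem.List.sorted S (fun x => x) false with hL
  have hperm : L.Perm S := PySem.List.sorted_perm S (fun x => x) false
  have hsum : L.sum = S.sum := hperm.sum_eq
  have hpair : L.Pairwise (· ≤ ·) := PySem.List.sorted_pairwise S (fun x => x)
  simp only [hsum]
  by_cases hlt : S.sum < P.sum
  · simp [hlt]
  · by_cases heq : S.sum - P.sum = 0
    · simp [show S.sum = P.sum by omega]
    · have he : 0 < S.sum - P.sum := by omega
      have hppos : 0 ≤ P.sum := by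
        rcases hpre with h | h
        · omega
        · exact h
      simp only [if_neg hlt, if_neg heq, if_neg (show ¬ S.sum = P.sum by omega)]
      have hA : solLoopA (L.length : Int) (S.sum - P.sum) L 0 0
          = ((L.length : Int) - 0) - (L.length : Int) + cntA L (S.sum - P.sum - 0) :=
        bridgeA hpair (by omega) (by rw [hsum]; omega)
      have hB : solLoopB P.sum L.reverse 0 0 = 0 + cntB L.reverse (P.sum - 0) :=
        bridgeB (by rw [List.pairwise_reverse]; exact hpair)
          (by rw [List.sum_reverse, hsum]; omega)
      rw [show (P.sum - 0) = P.sum by ring] at hB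
      rw [hA, hB, show S.sum - P.sum - 0 = S.sum - P.sum by ring,
        cntA_eq_cntB_reverse, hsum, show S.sum - (S.sum - P.sum) = P.sum by ring]
      omega
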